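-- pv_equiv track=rewrite | github.com/mdsafeeramed/pythoncode_prac | Int_Prac_1st_july_2024/Int_Prac_11_20_1st_july_2024.py | merge_three_unequal_list
-- ===== SOURCE A (Python) =====
-- def merge_three_unequal_list(mylist1, mylist2, mylist3):
--     myresults = []
--     max1 = max(len(mylist1), len(mylist2), len(mylist3))
--     for x in range(max1):
--         if len(mylist1) < max1:
--             mylist1.append(0)
--         if len(mylist2) < max1:
--             mylist2.append(0)
--         if len(mylist3) < max1:
--             mylist3.append(0)
--         myresults.append((mylist1[x], mylist2[x], mylist3[x]))
--     return myresults
-- ===== SOURCE B (Python) =====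
-- def merge_three_unequal_list(mylist1, mylist2, mylist3):
--     # Preallocate the output as a table of [0, 0, 0] rows, then scatter each input
--     # list into its own column; no padding of the inputs, no zip, no conditional appends.
--     # (Unlike A, this does not mutate the argument lists; the return value is the same.)
--     max1 = max(len(mylist1), len(mylist2), len(mylist3))
--     rows = [[0, 0, 0] for _ in range(max1)]
--     for i, v in enumerate(mylist1):
--         rows[i][0] = v
--     for i, v in enumerate(mylist2):
--         rows[i][1] = v
--     for i, v in enumerate(mylist3):
--         rows[i][2] = v
--     return [tuple(r) for r in rows]
-- ===== Notes on version B (the rewrite author's own statement) =====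
-- stated objective: alternative
-- what changed: Replaces A's interleaved pad-one-zero-per-iteration-and-index loop by a scatter: preallocate the output as a table of (0,0,0) rows and write each input list into its own column, so the inputs are never padded or mutated (A mutates them in place) and no per-iteration length checks or zips occur.
import Mathlib
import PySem

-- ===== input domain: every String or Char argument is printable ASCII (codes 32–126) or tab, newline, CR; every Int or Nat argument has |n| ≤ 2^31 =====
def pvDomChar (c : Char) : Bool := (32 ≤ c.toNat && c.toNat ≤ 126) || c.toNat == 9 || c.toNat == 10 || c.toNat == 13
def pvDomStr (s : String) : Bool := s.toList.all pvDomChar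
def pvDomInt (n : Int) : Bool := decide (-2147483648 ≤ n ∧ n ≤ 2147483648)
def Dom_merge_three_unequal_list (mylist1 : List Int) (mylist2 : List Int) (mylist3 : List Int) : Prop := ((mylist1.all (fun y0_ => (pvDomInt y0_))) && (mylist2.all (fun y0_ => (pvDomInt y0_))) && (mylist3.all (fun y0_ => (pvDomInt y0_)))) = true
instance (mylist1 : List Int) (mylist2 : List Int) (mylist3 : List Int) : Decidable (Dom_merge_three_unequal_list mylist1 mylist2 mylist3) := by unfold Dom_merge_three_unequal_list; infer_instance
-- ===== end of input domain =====

-- B replaces A's interleaved pad-one-zero-and-index loop by a scatter: preallocate the output as a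
-- table of (0,0,0) rows and write each input list into its own column. A mutates its argument lists
-- in place and B does not: the equivalence proved here is about the return value only.
-- ===== PORT A =====
-- In the loop body, index x is always in range (each list shorter than max1 grows by one every
-- iteration, so its length after the padding step is at least x+1); hence getD's default 0 is never used.
-- loop body of A (one iteration of `for x in range(max1)`)
def pvStepA (max1 : Nat) (st : List Int × List Int × List Int × List (Int × Int × Int)) (x : Nat) :
    List Int × List Int × List Int × List (Int × Int × Int) :=
  let a := if st.1.length < max1 then st.1 ++ [0] else st.1
  let b := if st.2.1.length < max1 then st.2.1 ++ [0] else st.2.1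
  let c := if st.2.2.1.length < max1 then st.2.2.1 ++ [0] else st.2.2.1
  (a, b, c, st.2.2.2 ++ [(a.getD x 0, b.getD x 0, c.getD x 0)])

def merge_three_unequal_list (mylist1 : List Int) (mylist2 : List Int) (mylist3 : List Int) : List (Int × Int × Int) :=
  let max1 := Nat.max mylist1.length (Nat.max mylist2.length mylist3.length)
  let st := (List.range max1).foldl (pvStepA max1) (mylist1, mylist2, mylist3, ([] : List (Int × Int × Int)))
  st.2.2.2

-- ===== PORT B =====
-- one `for i, v in enumerate(l): rows[i][g] = v` loop of Source B: g says which field of row i is set;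
-- enumerate's indices are the nonnegative 0,1,2,…, so `.toNat` is exact here (no negative wraparound)
def pvScatter (g : Int → Int × Int × Int → Int × Int × Int)
    (rows : List (Int × Int × Int)) (l : List Int) : List (Int × Int × Int) :=
  (PySem.List.enumerate l).foldl (fun rs p => rs.modify p.1.toNat (g p.2)) rows

def merge_three_unequal_list_alt (mylist1 : List Int) (mylist2 : List Int) (mylist3 : List Int) : List (Int × Int × Int) :=
  let max1 := Nat.max mylist1.length (Nat.max mylist2.length mylist3.length)
  let rows0 := List.replicate max1 ((0 : Int), (0 : Int), (0 : Int))
  let rows1 := pvScatter (fun v r => (v, r.2.1, r.2.2)) rows0 mylist1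
  let rows2 := pvScatter (fun v r => (r.1, v, r.2.2)) rows1 mylist2
  let rows3 := pvScatter (fun v r => (r.1, r.2.1, v)) rows2 mylist3
  rows3  -- `[tuple(r) for r in rows]` is the identity under the tuple representation of rows

-- ===== PRECONDITION & SPEC =====
def Spec_merge_three_unequal_list (mylist1 : List Int) (mylist2 : List Int) (mylist3 : List Int) (out : List (Int × Int × Int)) : Prop := out = merge_three_unequal_list_alt mylist1 mylist2 mylist3
instance (mylist1 : List Int) (mylist2 : List Int) (mylist3 : List Int) (out : List (Int × Int × Int)) : Decidable (Spec_merge_three_unequal_list mylist1 mylist2 mylist3 out) := by unfold Spec_merge_three_unequal_list; infer_instance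

-- ===== CLAIM (what is proved, stated in full; the proofs are below) =====
def Claim_equal_merge_three_unequal_list : Prop := ∀ (mylist1 : List Int) (mylist2 : List Int) (mylist3 : List Int), Dom_merge_three_unequal_list mylist1 mylist2 mylist3 → Spec_merge_three_unequal_list mylist1 mylist2 mylist3 (merge_three_unequal_list mylist1 mylist2 mylist3)

-- ===== LEMMAS AND PROOFS =====

-- the fully zero-padded list (the common middle point of the two proofs)
def pvPad (l : List Int) (m : Nat) : List Int := l ++ List.replicate (m - l.length) 0

lemma pvPad_length (l : List Int) (m : Nat) (h : l.length ≤ m) : (pvPad l m).length = m := by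
  simp [pvPad]; omega

lemma pvPad_step (l : List Int) (m k : Nat) (h : l.length ≤ m) (hk : k < m) :
    (if ((pvPad l m).take (min (l.length + k) m)).length < m
      then (pvPad l m).take (min (l.length + k) m) ++ [0]
      else (pvPad l m).take (min (l.length + k) m))
    = (pvPad l m).take (min (l.length + k + 1) m) := by
  have hlen : ((pvPad l m).take (min (l.length + k) m)).length = min (l.length + k) m := by
    rw [List.length_take, pvPad_length l m h]
    omega
  by_cases h' : l.length + k < m
  · have hmin : min (l.length + k) m = l.length + k := by omega
    have hmin' : min (l.length + k + 1) m = l.length + k + 1 := by omega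
    rw [hlen, hmin, hmin', if_pos (by omega)]
    rw [List.take_add_one]
    congr 1
    have : (pvPad l m)[l.length + k]? = some 0 := by
      rw [List.getElem?_eq_getElem (by rw [pvPad_length l m h]; omega)]
      congr 1
      unfold pvPad
      rw [List.getElem_append_right (by omega)]
      simp
    simp [this]
  · have hmin : min (l.length + k) m = m := by omega
    have hmin' : min (l.length + k + 1) m = m := by omega
    rw [hlen, hmin, hmin', if_neg (by omega)]

lemma pvPad_take_getD (l : List Int) (m k : Nat) (_h : l.length ≤ m) (_hk : k < m) :
    ((pvPad l m).take (min (l.length + k + 1) m)).getD k 0 = (pvPad l m).getD k 0 := by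
  have hk' : k < min (l.length + k + 1) m := by omega
  simp [List.getD, hk']

lemma zip3_take_succ (p1 p2 p3 : List Int) (m k : Nat)
    (h1 : p1.length = m) (h2 : p2.length = m) (h3 : p3.length = m) (hk : k < m) :
    (p1.zip (p2.zip p3)).take (k + 1)
    = (p1.zip (p2.zip p3)).take k ++ [(p1.getD k 0, p2.getD k 0, p3.getD k 0)] := by
  rw [List.take_add_one]
  congr 1
  have hz : (p1.zip (p2.zip p3)).length = m := by simp [h1, h2, h3]
  rw [List.getElem?_eq_getElem (by omega)]
  simp [List.getElem_zip, List.getD_eq_getElem?_getD,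
        List.getElem?_eq_getElem (show k < p1.length by omega),
        List.getElem?_eq_getElem (show k < p2.length by omega),
        List.getElem?_eq_getElem (show k < p3.length by omega)]

lemma loop_inv (l1 l2 l3 : List Int) (m : Nat)
    (h1 : l1.length ≤ m) (h2 : l2.length ≤ m) (h3 : l3.length ≤ m) :
    ∀ k, k ≤ m →
    (List.range k).foldl (pvStepA m) (l1, l2, l3, ([] : List (Int × Int × Int)))
    = ((pvPad l1 m).take (min (l1.length + k) m),
       (pvPad l2 m).take (min (l2.length + k) m),
       (pvPad l3 m).take (min (l3.length + k) m),
       ((pvPad l1 m).zip ((pvPad l2 m).zip (pvPad l3 m))).take k) := by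
  intro k
  induction k with
  | zero =>
    intro _
    simp only [List.range_zero, List.foldl_nil, Nat.add_zero, List.take_zero]
    rw [min_eq_left h1, min_eq_left h2, min_eq_left h3]
    unfold pvPad
    rw [List.take_left, List.take_left, List.take_left]
  | succ k ih =>
    intro hk1
    have hk : k < m := by omega
    rw [List.range_succ, List.foldl_append, List.foldl_cons, List.foldl_nil, ih (by omega)]
    simp only [pvStepA]
    rw [pvPad_step l1 m k h1 hk, pvPad_step l2 m k h2 hk, pvPad_step l3 m k h3 hk]
    rw [pvPad_take_getD l1 m k h1 hk, pvPad_take_getD l2 m k h2 hk, pvPad_take_getD l3 m k h3 hk]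
    rw [zip3_take_succ _ _ _ m k (pvPad_length l1 m h1) (pvPad_length l2 m h2) (pvPad_length l3 m h3) hk]
    simp [Nat.add_assoc]

-- the scatter loop, fully characterised: what each cell of the table holds afterwards
lemma scat_aux (g : Int → Int × Int × Int → Int × Int × Int) :
    ∀ (l : List Int) (s : Nat) (rows : List (Int × Int × Int)) (j : Nat),
    ((PySem.List.enumerate l (s : Int)).foldl (fun rs p => rs.modify p.1.toNat (g p.2)) rows)[j]?
    = if s ≤ j ∧ j < s + l.length then rows[j]?.map (g (l.getD (j - s) 0)) else rows[j]? := by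
  intro l
  induction l with
  | nil =>
    intro s rows j
    rw [PySem.List.enumerate_nil, List.foldl_nil, if_neg (by rw [List.length_nil]; omega)]
  | cons a t ih =>
    intro s rows j
    rw [PySem.List.enumerate_cons, List.foldl_cons]
    have hcast : ((s : Int) + 1) = ((s + 1 : Nat) : Int) := by push_cast; ring
    rw [hcast, ih (s + 1)]
    have hsn : (s : Int).toNat = s := Int.toNat_natCast s
    rw [hsn]
    simp only [List.length_cons]
    by_cases hj : j = s
    · subst hj
      rw [if_neg (by omega), if_pos (by constructor <;> omega)]
      rw [List.getElem?_modify]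
      cases rows[j]? <;> simp
    · have hsj : s ≠ j := fun h => hj h.symm
      by_cases h2 : s + 1 ≤ j ∧ j < s + 1 + t.length
      · rw [if_pos h2, if_pos (by omega)]
        rw [List.getElem?_modify]
        have hd : (a :: t).getD (j - s) 0 = t.getD (j - (s + 1)) 0 := by
          obtain ⟨k, hk⟩ : ∃ k, j - s = k + 1 := ⟨j - s - 1, by omega⟩
          rw [hk, List.getD_cons_succ]
          congr 1
          omega
        rw [hd]
        cases rows[j]? <;> simp [hsj]
      · rw [if_neg h2, if_neg (by omega)]
        rw [List.getElem?_modify]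
        cases rows[j]? <;> simp [hsj]

lemma pvScatter_getElem? (g : Int → Int × Int × Int → Int × Int × Int)
    (rows : List (Int × Int × Int)) (l : List Int) (j : Nat) :
    (pvScatter g rows l)[j]? = if j < l.length then rows[j]?.map (g (l.getD j 0)) else rows[j]? := by
  have h := scat_aux g l 0 rows j
  simpa [pvScatter] using h

lemma pvScatter_length (g : Int → Int × Int × Int → Int × Int × Int)
    (rows : List (Int × Int × Int)) (l : List Int) :
    (pvScatter g rows l).length = rows.length := by
  unfold pvScatter
  generalize PySem.List.enumerate l 0 = ps
  induction ps generalizing rows with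
  | nil => rfl
  | cons p pt ih => rw [List.foldl_cons, ih, List.length_modify]

lemma pvPad_getElem (l : List Int) (m j : Nat) (h : l.length ≤ m) (hj : j < m) :
    (pvPad l m)[j]'(by rw [pvPad_length l m h]; exact hj)
    = if j < l.length then l.getD j 0 else 0 := by
  by_cases hc : j < l.length
  · rw [if_pos hc]
    unfold pvPad
    rw [List.getElem_append_left hc]
    simp [List.getD, List.getElem?_eq_getElem hc]
  · rw [if_neg hc]
    unfold pvPad
    rw [List.getElem_append_right (by omega)]
    simp

-- B equals the zip of the fully padded lists
lemma alt_eq_zipPad (l1 l2 l3 : List Int) :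
    merge_three_unequal_list_alt l1 l2 l3
    = (pvPad l1 (Nat.max l1.length (Nat.max l2.length l3.length))).zip
        ((pvPad l2 (Nat.max l1.length (Nat.max l2.length l3.length))).zip
          (pvPad l3 (Nat.max l1.length (Nat.max l2.length l3.length)))) := by
  have h1 : l1.length ≤ Nat.max l1.length (Nat.max l2.length l3.length) := le_max_left _ _
  have h2 : l2.length ≤ Nat.max l1.length (Nat.max l2.length l3.length) :=
    le_trans (le_max_left _ _) (le_max_right _ _)
  have h3 : l3.length ≤ Nat.max l1.length (Nat.max l2.length l3.length) :=
    le_trans (le_max_right _ _) (le_max_right _ _)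
  set m := Nat.max l1.length (Nat.max l2.length l3.length) with hm
  have hlenL : (merge_three_unequal_list_alt l1 l2 l3).length = m := by
    simp only [merge_three_unequal_list_alt, pvScatter_length, List.length_replicate, ← hm]
  have hlenR : ((pvPad l1 m).zip ((pvPad l2 m).zip (pvPad l3 m))).length = m := by
    simp [pvPad_length l1 m h1, pvPad_length l2 m h2, pvPad_length l3 m h3]
  apply List.ext_getElem (by rw [hlenL, hlenR])
  intro j hjl hjr
  have hj : j < m := by rwa [hlenL] at hjl
  have hsome : (merge_three_unequal_list_alt l1 l2 l3)[j]?
      = some ((if j < l1.length then l1.getD j 0 else 0),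
              (if j < l2.length then l2.getD j 0 else 0),
              (if j < l3.length then l3.getD j 0 else 0)) := by
    simp only [merge_three_unequal_list_alt, ← hm, pvScatter_getElem?]
    have h0 : (List.replicate m ((0 : Int), (0 : Int), (0 : Int)))[j]? = some (0, 0, 0) := by
      simp [hj]
    by_cases k1 : j < l1.length <;> by_cases k2 : j < l2.length <;> by_cases k3 : j < l3.length <;>
      simp [k1, k2, k3, h0]
  have hL : (merge_three_unequal_list_alt l1 l2 l3)[j]
      = ((if j < l1.length then l1.getD j 0 else 0),
         (if j < l2.length then l2.getD j 0 else 0),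
         (if j < l3.length then l3.getD j 0 else 0)) := by
    have := List.getElem?_eq_getElem hjl
    rw [this] at hsome
    exact Option.some.inj hsome
  rw [hL, List.getElem_zip, List.getElem_zip]
  rw [pvPad_getElem l1 m j h1 hj, pvPad_getElem l2 m j h2 hj, pvPad_getElem l3 m j h3 hj]

-- ===== VERDICT (by name: the statement is the Claim_ definition above) =====
theorem merge_three_unequal_list_spec : Claim_equal_merge_three_unequal_list := by
  intro l1 l2 l3 _
  unfold Spec_merge_three_unequal_list merge_three_unequal_list
  have h1 : l1.length ≤ Nat.max l1.length (Nat.max l2.length l3.length) := le_max_left _ _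
  have h2 : l2.length ≤ Nat.max l1.length (Nat.max l2.length l3.length) :=
    le_trans (le_max_left _ _) (le_max_right _ _)
  have h3 : l3.length ≤ Nat.max l1.length (Nat.max l2.length l3.length) :=
    le_trans (le_max_right _ _) (le_max_right _ _)
  set m := Nat.max l1.length (Nat.max l2.length l3.length) with hm
  simp only [loop_inv l1 l2 l3 m h1 h2 h3 m le_rfl]
  rw [alt_eq_zipPad l1 l2 l3, ← hm]
  show ((pvPad l1 m).zip ((pvPad l2 m).zip (pvPad l3 m))).take m = _
  rw [List.take_of_length_le (by simp [pvPad_length l1 m h1, pvPad_length l2 m h2, pvPad_length l3 m h3])]
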